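-- pv_equiv track=rewrite | github.com/mikkokuusela/wazuh-log-exporter-sender | archiver.py | _sftp_batch_mkdir
-- ===== SOURCE A (Python) =====
-- def _sftp_batch_mkdir(remote_dir: str) -> list:
--     """
--     Return sftp batch-mode lines that create the full remote directory tree.
--
--     The leading '-' on each mkdir suppresses the error when the directory
--     already exists, so subsequent runs are idempotent.
--     """
--     parts = remote_dir.strip("/").split("/")
--     lines = []
--     path = ""
--     for part in parts:
--         path = f"{path}/{part}"
--         lines.append(f"-mkdir {path}")
--     return lines
-- ===== SOURCE B (Python) =====
-- def _sftp_batch_mkdir(remote_dir: str) -> list: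
--     """Index-based: each cumulative path is rebuilt from a slice of the parts,
--     instead of extending a running accumulator string."""
--     parts = remote_dir.strip("/").split("/")
--     return [f"-mkdir /{'/'.join(parts[:i + 1])}" for i in range(len(parts))]
-- ===== Notes on version B (the rewrite author's own statement) =====
-- stated objective: simpler
-- what changed: Replaces the running path accumulator and explicit append loop by a single index-based comprehension that rebuilds each cumulative path as '/' + '/'.join(parts[:i+1]).
import Mathlib
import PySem

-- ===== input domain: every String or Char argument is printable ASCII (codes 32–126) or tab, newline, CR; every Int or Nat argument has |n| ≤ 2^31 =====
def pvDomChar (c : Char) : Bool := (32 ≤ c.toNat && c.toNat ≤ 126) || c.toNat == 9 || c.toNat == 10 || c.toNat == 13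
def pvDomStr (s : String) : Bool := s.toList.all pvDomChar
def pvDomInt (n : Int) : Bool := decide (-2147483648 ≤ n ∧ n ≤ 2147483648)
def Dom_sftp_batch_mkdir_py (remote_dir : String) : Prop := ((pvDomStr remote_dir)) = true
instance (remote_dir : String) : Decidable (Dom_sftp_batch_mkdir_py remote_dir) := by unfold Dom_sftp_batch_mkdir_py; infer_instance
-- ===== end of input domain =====

-- B replaces A's running `path` accumulator by an index-based comprehension that rebuilds
-- each cumulative path from a slice (`'/' + '/'.join(parts[:i+1])`): simpler, same cost.


-- ===== PORT A =====
-- parts = remote_dir.strip("/").split("/"); then the loop keeps (path, lines),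
-- path = f"{path}/{part}", lines.append(f"-mkdir {path}").  Worked on List Char
-- (PySem.Chars) as PYSEM.md directs; the nonempty literal separator "/" makes
-- Chars.splitOn the exact port of str.split("/").
def sftp_batch_mkdir_py (remote_dir : String) : List String :=
  let parts : List (List Char) :=
    PySem.Chars.splitOn (PySem.Chars.stripChars remote_dir.toList ['/']) ['/']
  let r := parts.foldl
    (fun (st : List Char × List (List Char)) part =>
      let path := st.1 ++ ['/'] ++ part
      (path, st.2 ++ ["-mkdir ".toList ++ path]))
    ([], [])
  r.2.map String.ofList

-- ===== PORT B =====
-- same normalisation, then one comprehension over indices: line i is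
-- "-mkdir /" + "/".join(parts[:i+1]).
def sftp_batch_mkdir_py_alt (remote_dir : String) : List String :=
  let parts : List (List Char) :=
    PySem.Chars.splitOn (PySem.Chars.stripChars remote_dir.toList ['/']) ['/']
  (List.range parts.length).map (fun i =>
    String.ofList ("-mkdir /".toList ++ PySem.Chars.join ['/'] (parts.take (i + 1))))

-- ===== PRECONDITION & SPEC =====
def Spec_sftp_batch_mkdir_py (remote_dir : String) (out : List String) : Prop := out = sftp_batch_mkdir_py_alt remote_dir
instance (remote_dir : String) (out : List String) : Decidable (Spec_sftp_batch_mkdir_py remote_dir out) := by unfold Spec_sftp_batch_mkdir_py; infer_instance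

-- ===== CLAIM (what is proved, stated in full; the proofs are below) =====
def Claim_equal_sftp_batch_mkdir_py : Prop := ∀ (remote_dir : String), Dom_sftp_batch_mkdir_py remote_dir → Spec_sftp_batch_mkdir_py remote_dir (sftp_batch_mkdir_py remote_dir)

-- ===== LEMMAS AND PROOFS =====

-- A's accumulator loop, characterised: after folding over `parts` from state
-- (path, lines), the produced lines are `lines` followed by one line per index i,
-- whose path is `path` extended by the joined (i+1)-element prefix of `parts`.
theorem pv_loop_eq (parts : List (List Char)) (path : List Char) (lines : List (List Char)) :
    (parts.foldl
      (fun (st : List Char × List (List Char)) part =>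
        let p := st.1 ++ ['/'] ++ part
        (p, st.2 ++ ["-mkdir ".toList ++ p]))
      (path, lines)).2
    = lines ++ (List.range parts.length).map (fun i =>
        "-mkdir ".toList ++ path ++ ['/'] ++ PySem.Chars.join ['/'] (parts.take (i + 1))) := by
  induction parts generalizing path lines with
  | nil => simp
  | cons p t ih =>
    simp only [List.foldl_cons, List.length_cons, List.range_succ_eq_map, List.map_cons,
      List.map_map]
    rw [ih]
    simp only [List.take_succ_cons, List.take_zero, PySem.Chars.join_singleton,
      List.append_assoc, List.singleton_append]
    congr 1
    simp only [List.cons_append]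
    congr 1
    apply List.map_congr_left
    intro i _
    cases t with
    | nil => simp at *
    | cons q r =>
      simp [Function.comp, List.take_succ_cons, PySem.Chars.join_cons_cons]

-- the two string literals used by the ports
theorem pv_lit : "-mkdir /".toList = "-mkdir ".toList ++ ['/'] := by decide

-- ===== VERDICT (by name: the statement is the Claim_ definition above) =====
theorem sftp_batch_mkdir_py_spec : Claim_equal_sftp_batch_mkdir_py := by
  intro remote_dir _
  show sftp_batch_mkdir_py remote_dir = sftp_batch_mkdir_py_alt remote_dir
  simp only [sftp_batch_mkdir_py, sftp_batch_mkdir_py_alt]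
  rw [pv_loop_eq]
  simp [pv_lit]
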